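-- pv_equiv track=rewrite | github.com/DeepPSP/torch_ecg | references/cpsc2019/CPSC0343_qrs8664_hr9173/sig_tool.py | stag
-- ===== SOURCE A (Python) =====
-- def stag(x, stag_len):
--     x_stag = []
--     x_ex = []
--     for idx in range(stag_len):
--         x_ex.append(x[0])
--     for idx in range(len(x)):
--         x_ex.append(x[idx])
--     for idx in range(stag_len):
--         x_ex.append(x[-1])
--     for idx in range(len(x)):
--         x_stag.append(x_ex[idx:idx+stag_len*2+1])
--
--     return x_stag
-- ===== SOURCE B (Python) =====
-- def stag(x, stag_len):
--     # B: clamped direct indexing, no padded intermediate list.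
--     n = len(x)
--     out = []
--     for idx in range(n):
--         w = []
--         for off in range(-stag_len, stag_len + 1):
--             j = idx + off
--             w.append(x[0] if j < 0 else x[n - 1] if j >= n else x[j])
--         out.append(w)
--     return out
-- ===== Notes on version B (the rewrite author's own statement) =====
-- stated objective: simpler
-- what changed: B builds each window by direct edge-clamped indexing into x instead of constructing the padded intermediate list x_ex and slicing it.
-- intended difference: For stag_len < 0 with len(x) >= -2*stag_len, A's slice stop index idx+2*stag_len+1 goes negative and wraps around to the end of x, so A returns accidental nonempty slices; B returns the intended empty windows (a window of length 2*stag_len+1 <= 0 has no elements). — e.g. on stag([1, 2], -1): A returns [[1], []], B returns [[], []]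
import Mathlib
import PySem

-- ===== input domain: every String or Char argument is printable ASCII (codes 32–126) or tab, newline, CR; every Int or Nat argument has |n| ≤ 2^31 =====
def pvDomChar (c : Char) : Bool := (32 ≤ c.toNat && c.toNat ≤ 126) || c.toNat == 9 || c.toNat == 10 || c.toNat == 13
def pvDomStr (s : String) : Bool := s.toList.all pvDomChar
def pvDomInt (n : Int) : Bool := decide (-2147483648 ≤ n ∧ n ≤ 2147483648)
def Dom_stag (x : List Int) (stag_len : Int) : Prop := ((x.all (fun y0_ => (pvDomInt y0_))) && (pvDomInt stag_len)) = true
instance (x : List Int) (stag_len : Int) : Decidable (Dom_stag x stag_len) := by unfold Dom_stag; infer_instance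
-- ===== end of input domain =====

-- B replaces A's pad-then-slice with direct edge-clamped indexing into x (simpler decomposition, same cost);
-- equivalence is about the return value only (neither mutates its argument).

-- ===== PORT A =====
-- x[0] / x[idx] / x[-1] are ported as pyGetD … 0: under Pre_stag every such access is in range,
-- so the default is never taken (on empty x with stag_len > 0 Python raises; excluded by Pre_stag).
def stag (x : List Int) (stag_len : Int) : List (List Int) :=
  let x_ex : List Int := []
  let x_ex := (PySem.List.pyRange 0 stag_len 1).foldl
      (fun acc _ => acc ++ [PySem.List.pyGetD x 0 0]) x_ex
  let x_ex := (PySem.List.pyRange 0 (PySem.List.len x) 1).foldl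
      (fun acc idx => acc ++ [PySem.List.pyGetD x idx 0]) x_ex
  let x_ex := (PySem.List.pyRange 0 stag_len 1).foldl
      (fun acc _ => acc ++ [PySem.List.pyGetD x (-1) 0]) x_ex
  (PySem.List.pyRange 0 (PySem.List.len x) 1).foldl
      (fun acc idx => acc ++ [PySem.List.slice x_ex (some idx) (some (idx + stag_len * 2 + 1))]) []

-- ===== PORT B =====
def stag_alt (x : List Int) (stag_len : Int) : List (List Int) :=
  let n : Int := PySem.List.len x
  (PySem.List.pyRange 0 n 1).foldl
    (fun out idx =>
      out ++ [(PySem.List.pyRange (-stag_len) (stag_len + 1) 1).foldl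
        (fun w off =>
          let j := idx + off
          w ++ [if j < 0 then PySem.List.pyGetD x 0 0
                else if n ≤ j then PySem.List.pyGetD x (n - 1) 0
                else PySem.List.pyGetD x j 0]) []]) []

-- ===== PRECONDITION & SPEC =====
-- Pre_stag excludes exactly the inputs where A raises IndexError: empty x with stag_len > 0 (x[0] on []).
def Pre_stag (x : List Int) (stag_len : Int) : Prop := x ≠ [] ∨ stag_len ≤ 0
instance (x : List Int) (stag_len : Int) : Decidable (Pre_stag x stag_len) := by unfold Pre_stag; infer_instance
def pvWitness_stag : List Int × Int := ([1, 2], 1)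

-- For stag_len < 0 with len(x) ≥ -2*stag_len, A's slice stop index idx+2*stag_len+1 goes negative and wraps
-- around to the end of x, so A returns accidental nonempty slices; B returns the intended empty windows
-- (a window of length 2*stag_len+1 ≤ 0 has no elements).
def D_stag (x : List Int) (stag_len : Int) : Prop :=
  stag_len < 0 ∧ 0 ≤ (x.length : Int) + 2 * stag_len
instance (x : List Int) (stag_len : Int) : Decidable (D_stag x stag_len) := by unfold D_stag; infer_instance
def Spec_stag (x : List Int) (stag_len : Int) (out : List (List Int)) : Prop :=
  ¬ D_stag x stag_len → out = stag_alt x stag_len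
instance (x : List Int) (stag_len : Int) (out : List (List Int)) : Decidable (Spec_stag x stag_len out) := by unfold Spec_stag; infer_instance
def pvDiffWitness_stag : List Int × Int := ([1, 2], -1)
def pvDiffWitnessOut_stag : (List (List Int)) × (List (List Int)) := ([[1], []], [[], []])

-- ===== CLAIM (what is proved, stated in full; the proofs are below) =====
def Claim_unchanged_stag : Prop := ∀ (x : List Int) (stag_len : Int), Dom_stag x stag_len → Pre_stag x stag_len → Spec_stag x stag_len (stag x stag_len)
def Claim_changed_stag : Prop := Dom_stag (pvDiffWitness_stag.1) (pvDiffWitness_stag.2) ∧ Pre_stag (pvDiffWitness_stag.1) (pvDiffWitness_stag.2) ∧ D_stag (pvDiffWitness_stag.1) (pvDiffWitness_stag.2) ∧ stag (pvDiffWitness_stag.1) (pvDiffWitness_stag.2) = pvDiffWitnessOut_stag.1 ∧ stag_alt (pvDiffWitness_stag.1) (pvDiffWitness_stag.2) = pvDiffWitnessOut_stag.2 ∧ pvDiffWitnessOut_stag.1 ≠ pvDiffWitnessOut_stag.2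
def Claim_exact_stag : Prop := ∀ (x : List Int) (stag_len : Int), Dom_stag x stag_len → Pre_stag x stag_len → D_stag x stag_len → stag x stag_len ≠ stag_alt x stag_len

-- ===== LEMMAS AND PROOFS =====

lemma stagA_norm (x : List Int) (s : Int) :
    stag x s = (PySem.List.pyRange 0 (PySem.List.len x) 1).map
      (fun idx => PySem.List.slice
        (List.replicate s.toNat (PySem.List.pyGetD x 0 0) ++ x ++ List.replicate s.toNat (PySem.List.pyGetD x (-1) 0))
        (some idx) (some (idx + s * 2 + 1))) := by
  simp only [stag, PySem.List.foldl_append_singleton_eq_map, List.nil_append,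
    PySem.List.map_pyGetD_pyRange_zero, List.map_const', PySem.List.length_pyRange_one, Int.sub_zero]

lemma stagB_norm (x : List Int) (s : Int) :
    stag_alt x s = (PySem.List.pyRange 0 (PySem.List.len x) 1).map
      (fun idx => (PySem.List.pyRange (-s) (s + 1) 1).map
        (fun off =>
          if idx + off < 0 then PySem.List.pyGetD x 0 0
          else if PySem.List.len x ≤ idx + off then PySem.List.pyGetD x (PySem.List.len x - 1) 0
          else PySem.List.pyGetD x (idx + off) 0)) := by
  simp only [stag_alt, PySem.List.foldl_append_singleton_eq_map, List.nil_append]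

lemma window_eq (x : List Int) (sN iN : Nat) (hi : iN < x.length) :
    PySem.List.slice
        (List.replicate sN (PySem.List.pyGetD x 0 0) ++ x ++ List.replicate sN (PySem.List.pyGetD x (-1) 0))
        (some (iN : Int)) (some ((iN : Int) + (sN : Int) * 2 + 1))
      = (PySem.List.pyRange (-(sN : Int)) ((sN : Int) + 1) 1).map
        (fun off =>
          if (iN : Int) + off < 0 then PySem.List.pyGetD x 0 0
          else if ((x.length : Int)) ≤ (iN : Int) + off then PySem.List.pyGetD x ((x.length : Int) - 1) 0
          else PySem.List.pyGetD x ((iN : Int) + off) 0) := by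
  have hx : x ≠ [] := by intro h; subst h; simp at hi
  set a := PySem.List.pyGetD x 0 0 with ha
  set b := PySem.List.pyGetD x (-1) 0 with hb
  have h1 : (iN : Int) + (sN : Int) * 2 + 1 = (iN : Int) + ((2 * sN + 1 : Nat) : Int) := by push_cast; ring
  rw [h1, PySem.List.slice_natCast_add]
  apply List.ext_getElem
  · simp [PySem.List.length_pyRange_one]
    omega
  · intro t h3 h4
    simp only [List.getElem_take, List.getElem_drop, List.getElem_map,
      PySem.List.getElem_pyRange_one]
    have ht : t < 2 * sN + 1 := by
      simp only [List.length_map, PySem.List.length_pyRange_one] at h4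
      omega
    by_cases c1 : iN + t < sN
    · rw [if_pos (by omega),
        List.getElem_append_left (by simp; omega),
        List.getElem_append_left (by simp; omega),
        List.getElem_replicate]
    · by_cases c2 : iN + t < sN + x.length
      · rw [if_neg (by omega), if_neg (by omega),
          List.getElem_append_left (by simp; omega),
          List.getElem_append_right (by simp; omega),
          PySem.List.pyGetD_eq_getElem x 0 (by omega) (by omega)]
        congr 1
        simp only [List.length_replicate]
        omega
      · rw [if_neg (by omega), if_pos (by omega),
          List.getElem_append_right (by simp; omega),
          List.getElem_replicate,
          PySem.List.pyGetD_eq_getElem x 0 (by omega) (by omega)]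
        rw [hb, PySem.List.pyGetD_neg_one x 0 hx, List.getLast_eq_getElem]
        congr 1
        simp

lemma slice_neg_nil (x : List Int) (s idx : Int) (hD : (x.length : Int) + 2 * s < 0)
    (h0 : 0 ≤ idx) (h1 : idx < (x.length : Int)) :
    PySem.List.slice x (some idx) (some (idx + s * 2 + 1)) = [] := by
  apply List.eq_nil_of_length_eq_zero
  rw [PySem.List.length_slice]
  simp only [PySem.List.clampIdx]
  split_ifs <;> omega

theorem main_eq (x : List Int) (s : Int) (hnD : ¬ (s < 0 ∧ 0 ≤ (x.length : Int) + 2 * s)) :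
    stag x s = stag_alt x s := by
  rw [stagA_norm, stagB_norm]
  apply List.map_congr_left
  intro idx hidx
  rw [PySem.List.mem_pyRange_one] at hidx
  have hidx2 : idx < (x.length : Int) := by simpa [PySem.List.len_eq] using hidx.2
  by_cases hs : 0 ≤ s
  · lift s to ℕ using hs with sN
    lift idx to ℕ using hidx.1 with iN
    have hi : iN < x.length := by exact_mod_cast hidx2
    have h := window_eq x sN iN hi
    simpa [PySem.List.len_eq, Int.toNat_natCast] using h
  · push Not at hs
    have hD : (x.length : Int) + 2 * s < 0 := by
      by_contra hc
      exact hnD ⟨hs, by omega⟩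
    have hrep : s.toNat = 0 := by omega
    rw [hrep]
    simp only [List.replicate_zero, List.nil_append, List.append_nil]
    rw [PySem.List.pyRange_one_eq_nil (by omega : s + 1 ≤ -s)]
    simp only [List.map_nil]
    exact slice_neg_nil x s idx hD hidx.1 hidx2

theorem main_ne (x : List Int) (s : Int) (hs : s < 0) (hD : 0 ≤ (x.length : Int) + 2 * s) :
    stag x s ≠ stag_alt x s := by
  intro heq
  rw [stagA_norm, stagB_norm] at heq
  have hlen : (2 : Int) ≤ (x.length : Int) := by omega
  have hrep : s.toNat = 0 := by omega
  rw [hrep] at heq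
  simp only [List.replicate_zero, List.nil_append, List.append_nil] at heq
  have h0 := congrArg (fun l => l[0]?) heq
  simp only [PySem.List.len_eq] at h0
  rw [PySem.List.getElem?_map_pyRange_zero _ x.length 0 (by omega),
      PySem.List.getElem?_map_pyRange_zero _ x.length 0 (by omega)] at h0
  rw [PySem.List.pyRange_one_eq_nil (by omega : s + 1 ≤ -s)] at h0
  simp only [List.map_nil, Option.some.injEq] at h0
  have hl := congrArg List.length h0
  rw [PySem.List.length_slice] at hl
  simp only [PySem.List.clampIdx, List.length_nil] at hl
  split_ifs at hl <;> omega


-- ===== VERDICT (by name: the statement is the Claim_ definition above) =====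
theorem stag_spec : Claim_unchanged_stag := by
  intro x s _ _ hnD
  exact main_eq x s hnD
theorem stag_changed : Claim_changed_stag := by unfold Claim_changed_stag; decide
theorem stag_tight : Claim_exact_stag := by
  intro x s _ _ hD
  unfold D_stag at hD
  exact main_ne x s hD.1 hD.2
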